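-- pv_equiv track=rewrite | github.com/Timoniche/NLP | hw3/data_preparer.py | _shrink_roles_and_dialogue
-- ===== SOURCE A (Python) =====
-- def _shrink_roles_and_dialogue(raw_role, raw_dialog):
--     shrinked_role = []  # [user, bot, bot, user, user] -> [user, bot, user]
--     shrinked_dialog = []
--     prev_role = ''
--     for i in range(len(raw_dialog)):
--         if raw_role[i] != prev_role:
--             shrinked_role.append(raw_role[i])
--             shrinked_dialog.append(raw_dialog[i])
--         else:
--             shrinked_dialog[-1] += ' ' + raw_dialog[i]
--         prev_role = raw_role[i]
--
--     assert len(shrinked_dialog) == len(shrinked_role)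
--
--     shrinked_role, shrinked_dialog = _drop_first_bot_last_user_utterings(shrinked_role, shrinked_dialog)
--
--     return shrinked_role, shrinked_dialog
--
-- def _drop_first_bot_last_user_utterings(role, dialog):
--     if role[-1] == 'user':
--         role, dialog = role[:-1], dialog[:-1]
--     if role[0] == 'bot':
--         role, dialog = role[1:], dialog[1:]
--
--     return role, dialog
-- ===== SOURCE B (Python) =====
-- def _shrink_roles_and_dialogue(raw_role, raw_dialog):
--     n = len(raw_dialog)
--     pairs = list(zip(raw_role[:n], raw_dialog))
--     roles, dialogs = [], []
--     start = 0
--     while start < len(pairs):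
--         role = pairs[start][0]
--         k = start + 1
--         while k < len(pairs) and pairs[k][0] == role:
--             k += 1
--         roles.append(role)
--         dialogs.append(' '.join(d for _, d in pairs[start:k]))
--         start = k
--     if roles and roles[-1] == 'user':
--         roles, dialogs = roles[:-1], dialogs[:-1]
--     if roles and roles[0] == 'bot':
--         roles, dialogs = roles[1:], dialogs[1:]
--     return roles, dialogs
-- ===== Notes on version B (the rewrite author's own statement) =====
-- stated objective: alternative
-- what changed: B groups the dialogue into maximal runs of equal consecutive roles over zip(raw_role[:n], raw_dialog) and joins each run's dialogs once, instead of A's element-by-element prev_role loop that concatenates onto the last appended dialog in place; the end-trimming is the same but guarded against empty lists.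
import Mathlib
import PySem

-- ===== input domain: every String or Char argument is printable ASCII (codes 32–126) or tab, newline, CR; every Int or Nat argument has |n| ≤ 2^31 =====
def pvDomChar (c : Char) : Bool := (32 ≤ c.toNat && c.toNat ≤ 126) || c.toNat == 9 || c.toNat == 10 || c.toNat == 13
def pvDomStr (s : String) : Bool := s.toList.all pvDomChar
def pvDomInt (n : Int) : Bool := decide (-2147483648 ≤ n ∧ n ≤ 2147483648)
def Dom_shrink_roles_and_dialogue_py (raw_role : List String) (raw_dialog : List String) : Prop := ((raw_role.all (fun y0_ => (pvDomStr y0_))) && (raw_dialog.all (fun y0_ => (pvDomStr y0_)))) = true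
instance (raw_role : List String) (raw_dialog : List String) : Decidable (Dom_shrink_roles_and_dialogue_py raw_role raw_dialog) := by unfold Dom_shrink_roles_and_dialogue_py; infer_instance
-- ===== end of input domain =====

-- B merges consecutive same-role turns run-by-run (scan to the end of each run, join its dialogs once)
-- instead of A's element-by-element prev_role loop that concatenates onto the last entry in place;
-- same trimming; objective: alternative decomposition, same asymptotic cost.

-- ===== PORT A =====
-- body of A's for-loop: append on a role change, else extend the last dialog entry in place
def pvAStep (st : List String × List String × String) (r d : String) :
    List String × List String × String :=
  if r != st.2.2 then
    (st.1 ++ [r], st.2.1 ++ [d], r)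
  else
    (st.1, st.2.1.dropLast ++ [PySem.List.pyGetD st.2.1 (-1) "" ++ (" " ++ d)], r)

-- _drop_first_bot_last_user_utterings (A's helper; role[-1]/role[0] raise on empty — excluded by Pre_)
def pvDropA (role : List String) (dialog : List String) : List String × List String :=
  let p :=
    if PySem.List.pyGetD role (-1) "" == "user" then
      (PySem.List.slice role none (some (-1)), PySem.List.slice dialog none (some (-1)))
    else (role, dialog)
  if PySem.List.pyGetD p.1 0 "" == "bot" then
    (PySem.List.slice p.1 (some 1) none, PySem.List.slice p.2 (some 1) none)
  else p

def shrink_roles_and_dialogue_py (raw_role : List String) (raw_dialog : List String) : List String × List String :=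
  let st := (PySem.List.pyRange 0 (PySem.List.len raw_dialog) 1).foldl
    (fun st i => pvAStep st (PySem.List.pyGetD raw_role i "") (PySem.List.pyGetD raw_dialog i ""))
    ([], [], "")
  pvDropA st.1 st.2.1

-- ===== PORT B =====
-- run-by-run grouping: peel the maximal run of the first pair's role, join its dialogs once
def pvRunsB : List (String × String) → List String × List String
  | [] => ([], [])
  | (r, d) :: rest =>
      let run := rest.takeWhile (fun p => p.1 == r)
      let rest' := rest.dropWhile (fun p => p.1 == r)
      let RD := pvRunsB rest'
      (r :: RD.1, PySem.Str.join " " (d :: run.map Prod.snd) :: RD.2)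
  termination_by l => l.length
  decreasing_by
    exact Nat.lt_succ_of_le (List.length_dropWhile_le _ _)

def shrink_roles_and_dialogue_py_alt (raw_role : List String) (raw_dialog : List String) : List String × List String :=
  let pairs := (PySem.List.slice raw_role none (some (PySem.List.len raw_dialog))).zip raw_dialog
  let RD := pvRunsB pairs
  let p :=
    if !RD.1.isEmpty && (PySem.List.pyGetD RD.1 (-1) "" == "user") then
      (PySem.List.slice RD.1 none (some (-1)), PySem.List.slice RD.2 none (some (-1)))
    else (RD.1, RD.2)
  if !p.1.isEmpty && (PySem.List.pyGetD p.1 0 "" == "bot") then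
    (PySem.List.slice p.1 (some 1) none, PySem.List.slice p.2 (some 1) none)
  else p

-- ===== PRECONDITION & SPEC =====
-- Pre_ excludes exactly the inputs where A raises: raw_role shorter than raw_dialog (IndexError in the
-- loop), empty raw_dialog (role[-1] IndexError), a first role equal to '' (shrinked_dialog[-1] on an
-- empty list), and all used roles 'user' (role[0] IndexError after the trailing-user drop).
def Pre_shrink_roles_and_dialogue_py (raw_role : List String) (raw_dialog : List String) : Prop :=
  raw_dialog ≠ [] ∧ raw_dialog.length ≤ raw_role.length ∧ raw_role.getD 0 "" ≠ "" ∧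
    ¬ ((raw_role.take raw_dialog.length).all (fun r => r == "user") = true)
instance (raw_role : List String) (raw_dialog : List String) : Decidable (Pre_shrink_roles_and_dialogue_py raw_role raw_dialog) := by unfold Pre_shrink_roles_and_dialogue_py; infer_instance

def pvWitness_shrink_roles_and_dialogue_py : List String × List String :=
  (["user", "bot"], ["hi there", "hello"])

def Spec_shrink_roles_and_dialogue_py (raw_role : List String) (raw_dialog : List String) (out : List String × List String) : Prop := out = shrink_roles_and_dialogue_py_alt raw_role raw_dialog
instance (raw_role : List String) (raw_dialog : List String) (out : List String × List String) : Decidable (Spec_shrink_roles_and_dialogue_py raw_role raw_dialog out) := by unfold Spec_shrink_roles_and_dialogue_py; infer_instance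

-- ===== CLAIM (what is proved, stated in full; the proofs are below) =====
def Claim_equal_shrink_roles_and_dialogue_py : Prop := ∀ (raw_role : List String) (raw_dialog : List String), Dom_shrink_roles_and_dialogue_py raw_role raw_dialog → Pre_shrink_roles_and_dialogue_py raw_role raw_dialog → Spec_shrink_roles_and_dialogue_py raw_role raw_dialog (shrink_roles_and_dialogue_py raw_role raw_dialog)


-- ===== LEMMAS AND PROOFS =====

-- controllable unfolding of pvRunsB on a cons cell
theorem pvRunsB_cons (r d : String) (rest : List (String × String)) :
    pvRunsB ((r, d) :: rest)
      = (r :: (pvRunsB (rest.dropWhile (fun p => p.1 == r))).1,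
         PySem.Str.join " " (d :: (rest.takeWhile (fun p => p.1 == r)).map Prod.snd)
           :: (pvRunsB (rest.dropWhile (fun p => p.1 == r))).2) := by
  rw [pvRunsB]

-- ' '.join of a merged head: join " " (d :: d' :: ds) = join " " ((d ++ (" " ++ d')) :: ds)
theorem pvRunsB_nil : pvRunsB [] = ([], []) := by
  rw [pvRunsB]

theorem pvJoin_merge (d d' : String) (ds : List String) :
    PySem.Str.join " " (d :: d' :: ds) = PySem.Str.join " " ((d ++ (" " ++ d')) :: ds) := by
  cases ds with
  | nil =>
      simp [PySem.Str.join, PySem.Chars.join_cons_cons, PySem.Chars.join_singleton,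
        String.toList_append]
  | cons c cs =>
      simp [PySem.Str.join, PySem.Chars.join_cons_cons, String.toList_append,
        List.append_assoc]

theorem pvJoin_single (d : String) : PySem.Str.join " " [d] = d := by
  simp [PySem.Str.join, PySem.Chars.join_singleton]

-- every role occurring in L occurs among the run roles of pvRunsB L
theorem pvRunsB_fst_mem : ∀ (L : List (String × String)) (p : String × String),
    p ∈ L → p.1 ∈ (pvRunsB L).1
  | [], p, hp => by cases hp
  | (r, d) :: rest, p, hp => by
      rw [pvRunsB_cons]
      rcases List.mem_cons.mp hp with h | h
      · subst h; exact List.mem_cons_self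
      · rcases List.mem_append.mp
          (by rw [List.takeWhile_append_dropWhile
                    (p := fun q : String × String => q.1 == r)]; exact h) with h2 | h2
        · have : (p.1 == r) = true := List.mem_takeWhile_imp (p := fun q : String × String => q.1 == r) h2
          simp [eq_of_beq this]
        · exact List.mem_cons_of_mem _ (pvRunsB_fst_mem _ p h2)
  termination_by L => L.length
  decreasing_by
    exact Nat.lt_succ_of_le (List.length_dropWhile_le _ _)

-- A's index loop over range(len(rd)) is the same fold over zip(rr[:len(rd)], rd)
theorem pvFold_range_zip {α : Type} (step : α → String → String → α) :
    ∀ (rd rr : List String) (st : α), rd.length ≤ rr.length →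
      (List.range rd.length).foldl (fun st i => step st (rr.getD i "") (rd.getD i "")) st
        = ((rr.take rd.length).zip rd).foldl (fun st p => step st p.1 p.2) st := by
  intro rd
  induction rd with
  | nil => intro rr st _; simp
  | cons d rd' ih =>
      intro rr st hlen
      cases rr with
      | nil => simp at hlen
      | cons r rr' =>
          simp only [List.length_cons, List.range_succ_eq_map, List.foldl_cons, List.foldl_map,
            List.getD_cons_succ, List.getD_cons_zero, List.take_succ_cons, List.zip_cons_cons]
          exact ih rr' (step st r d) (by simpa using hlen)

-- A's fold from an open run (r, d) equals B's run grouping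
theorem pvLoop_runs : ∀ (L : List (String × String)) (r d : String) (sr sd : List String),
    L.foldl (fun st p => pvAStep st p.1 p.2) (sr ++ [r], sd ++ [d], r)
      = (sr ++ (pvRunsB ((r, d) :: L)).1, sd ++ (pvRunsB ((r, d) :: L)).2,
         (L.map Prod.fst).getLastD r)
  | [], r, d, sr, sd => by
      simp [pvRunsB_cons, pvRunsB_nil, pvJoin_single]
  | (r2, d2) :: L', r, d, sr, sd => by
      by_cases h : (r2 == r) = true
      · have hr : r2 = r := eq_of_beq h
        subst hr
        have hstep : pvAStep (sr ++ [r2], sd ++ [d], r2) r2 d2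
            = (sr ++ [r2], sd ++ [d ++ (" " ++ d2)], r2) := by
          simp [pvAStep, PySem.List.pyGetD_neg_one_append_singleton]
        rw [List.foldl_cons, hstep, pvLoop_runs L' r2 (d ++ (" " ++ d2)) sr sd]
        rw [pvRunsB_cons r2 d, pvRunsB_cons r2 (d ++ (" " ++ d2))]
        rw [List.takeWhile_cons_of_pos (by simp),
          List.dropWhile_cons_of_pos (by simp)]
        simp only [List.map_cons, List.getLastD_cons]
        rw [pvJoin_merge]
      · have hstep : pvAStep (sr ++ [r], sd ++ [d], r) r2 d2
            = ((sr ++ [r]) ++ [r2], (sd ++ [d]) ++ [d2], r2) := by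
          simp [pvAStep, bne, h]
        rw [List.foldl_cons, hstep, pvLoop_runs L' r2 d2 (sr ++ [r]) (sd ++ [d])]
        rw [pvRunsB_cons r d]
        rw [List.takeWhile_cons_of_neg (by simpa using h),
          List.dropWhile_cons_of_neg (by simpa using h)]
        simp only [List.map_nil, List.map_cons, List.getLastD_cons, pvJoin_single,
          List.append_assoc, List.singleton_append]

-- the two trimming phases agree when the merged role list is nonempty and not exactly ["user"]
theorem pvTrim_eq (R D : List String) (h0 : R ≠ []) (h1 : R ≠ ["user"]) :
    pvDropA R D
      = (let p :=
           if !R.isEmpty && (PySem.List.pyGetD R (-1) "" == "user") then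
             (PySem.List.slice R none (some (-1)), PySem.List.slice D none (some (-1)))
           else (R, D)
         if !p.1.isEmpty && (PySem.List.pyGetD p.1 0 "" == "bot") then
           (PySem.List.slice p.1 (some 1) none, PySem.List.slice p.2 (some 1) none)
         else p) := by
  have hne : R.isEmpty = false := by simpa [List.isEmpty_iff] using h0
  unfold pvDropA
  by_cases hu : (PySem.List.pyGetD R (-1) "" == "user") = true
  · have hdl : R.dropLast ≠ [] := by
      intro hd
      have hlast : R.getLast h0 = "user" := by
        have := PySem.List.pyGetD_neg_one R "" h0
        rw [this] at hu
        exact eq_of_beq hu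
      have : R = ["user"] := by
        have := List.dropLast_append_getLast h0
        rw [hd, hlast] at this
        simpa using this.symm
      exact h1 this
    have hdlne : R.dropLast.isEmpty = false := by simpa [List.isEmpty_iff] using hdl
    simp [hne, hu, PySem.List.slice_to_neg_one, hdlne]
  · simp [hne, hu]

-- ===== VERDICT (by name: the statement is the Claim_ definition above) =====
theorem shrink_roles_and_dialogue_py_spec : Claim_equal_shrink_roles_and_dialogue_py := by
  intro rr rd _ hpre
  obtain ⟨hne, hlen, hhead, hnotall⟩ := hpre
  cases hrd : rd with
  | nil => exact absurd hrd hne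
  | cons d0 rd' =>
  cases hrr : rr with
  | nil => rw [hrd, hrr] at hlen; simp at hlen
  | cons r0 rr' =>
  subst hrd; subst hrr
  have hr0 : r0 ≠ "" := by simpa using hhead
  show shrink_roles_and_dialogue_py _ _ = _
  unfold shrink_roles_and_dialogue_py shrink_roles_and_dialogue_py_alt
  simp only [PySem.List.len_eq, PySem.List.pyRange_zero_nat, List.foldl_map,
    PySem.List.pyGetD_natCast, PySem.List.slice_to_natCast]
  rw [pvFold_range_zip pvAStep (d0 :: rd') (r0 :: rr') ([], [], "") (by simpa using hlen)]
  have hz : ((r0 :: rr').take (d0 :: rd').length).zip (d0 :: rd')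
      = (r0, d0) :: ((rr'.take rd'.length).zip rd') := by
    simp
  rw [hz, List.foldl_cons]
  have hfirst : pvAStep ([], [], "") r0 d0 = ([] ++ [r0], [] ++ [d0], r0) := by
    have : (r0 == "") = false := beq_eq_false_iff_ne.mpr hr0
    simp [pvAStep, bne, this]
  rw [hfirst, pvLoop_runs]
  simp only [List.nil_append]
  have hR0 : (pvRunsB ((r0, d0) :: (rr'.take rd'.length).zip rd')).1 ≠ [] := by
    rw [pvRunsB_cons]; simp
  have hR1 : (pvRunsB ((r0, d0) :: (rr'.take rd'.length).zip rd')).1 ≠ ["user"] := by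
    intro habs
    apply hnotall
    rw [List.all_eq_true]
    intro x hx
    have hmap : (r0 :: rr').take (d0 :: rd').length
        = ((r0, d0) :: (rr'.take rd'.length).zip rd').map Prod.fst := by
      rw [← hz, List.map_fst_zip (by simp [List.length_take])]
    rw [hmap] at hx
    rcases List.mem_map.mp hx with ⟨p, hp, hpx⟩
    have := pvRunsB_fst_mem _ p hp
    rw [habs] at this
    simp at this
    rw [← hpx, this]
    rfl
  exact pvTrim_eq _ _ hR0 hR1
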